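-- pv_equiv track=rewrite | github.com/jl0up/magstab | magstab/dac/ad5791.py | _code_to_tuple
-- ===== SOURCE A (Python) =====
-- def _code_to_tuple(c: int, word_length=8, nb_of_words=3) -> tuple:
--     '''Converts a code (integer) to a tuple of binary words
--     '''
--     try:
--         assert isinstance(c, int)
--         assert 0 <= c < 2**(nb_of_words*word_length)
--     except:
--         raise
--     else:
--         return tuple([ ( c & (2**word_length-1 << i*word_length) ) >> i*word_length for i in range(nb_of_words)[::-1] ])
-- ===== SOURCE B (Python) =====
-- def _code_to_tuple(c: int, word_length=8, nb_of_words=3) -> tuple: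
--     '''Converts a code (integer) to a tuple of binary words
--     '''
--     assert isinstance(c, int)
--     assert 0 <= c < 2**(nb_of_words*word_length)
--     base = 2**word_length
--     words = []
--     rem = c
--     for _ in range(nb_of_words):
--         rem, word = divmod(rem, base)
--         words.append(word)
--     words.reverse()
--     return tuple(words)
-- ===== Notes on version B (the rewrite author's own statement) =====
-- stated objective: alternative
-- what changed: Replaced A's independent per-position mask-and-shift extraction over a reversed range by a sequential divmod loop that peels the low word off a running remainder (least-significant first) and reverses the collected list at the end.
import Mathlib
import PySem

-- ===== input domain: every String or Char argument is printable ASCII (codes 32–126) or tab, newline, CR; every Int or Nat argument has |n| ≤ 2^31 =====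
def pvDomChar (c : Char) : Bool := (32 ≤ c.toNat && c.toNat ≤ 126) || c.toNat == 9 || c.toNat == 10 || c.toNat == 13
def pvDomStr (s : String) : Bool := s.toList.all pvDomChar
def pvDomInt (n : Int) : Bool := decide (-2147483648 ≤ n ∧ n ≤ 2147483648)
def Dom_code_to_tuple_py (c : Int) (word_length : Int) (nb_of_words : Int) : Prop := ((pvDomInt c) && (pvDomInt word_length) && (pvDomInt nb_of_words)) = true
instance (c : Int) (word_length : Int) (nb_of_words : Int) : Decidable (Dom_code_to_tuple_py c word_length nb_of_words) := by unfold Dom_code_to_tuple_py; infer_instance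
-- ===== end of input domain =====

-- B replaces A's independent per-position mask-and-shift extraction by a sequential divmod
-- loop peeling the low word off a running remainder, reversing the collected list at the end
-- (objective: alternative decomposition; return value only — neither mutates its arguments).

-- ===== PORT A =====
-- [ (c & (2**word_length-1 << i*word_length)) >> i*word_length
--     for i in range(nb_of_words)[::-1] ]
-- Exponents/shift counts are nonnegative on Pre_ (0 ≤ word_length whenever the range is
-- nonempty, and i ≥ 0), so '.toNat' is exact there; Python raises outside Pre_.
def code_to_tuple_py (c : Int) (word_length : Int) (nb_of_words : Int) : List Int :=
  ((PySem.List.slice? (PySem.List.pyRange 0 nb_of_words 1) none none (-1)).getD []).map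
    (fun i => (PySem.Int.band c (((2 : Int) ^ word_length.toNat - 1) <<< (i * word_length).toNat)) >>> (i * word_length).toNat)

-- ===== PORT B =====
-- the loop 'for _ in range(nb_of_words): rem, word = divmod(rem, base); words.append(word)',
-- then 'words.reverse()'; base = 2**word_length (exponent exact on Pre_ as above)
def codeToTupleAltGo (base : Int) (rem : Int) (n : Nat) (words : List Int) : List Int :=
  match n with
  | 0 => words.reverse
  | n + 1 => codeToTupleAltGo base (PySem.Int.floordiv rem base) n (words ++ [PySem.Int.mod rem base])

def code_to_tuple_py_alt (c : Int) (word_length : Int) (nb_of_words : Int) : List Int :=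
  codeToTupleAltGo ((2 : Int) ^ word_length.toNat) c nb_of_words.toNat []

-- ===== PRECONDITION & SPEC =====
-- Exactly the inputs where the Python A returns, no more and no fewer (everywhere else
-- an assert or the comprehension raises): the asserts need 0 <= c < 2**(nb_of_words*word_length)
-- (for a negative exponent Python's fractional power admits only c = 0, which the .toNat
-- exponent, giving 2^0 = 1, captures exactly), and a negative word_length raises a TypeError
-- in the comprehension unless the range is empty (nb_of_words ≤ 0). The upper bound is
-- written through Nat.log2 so the instance computes even for astronomically large exponents:
-- for 0 ≤ c, 'c = 0 ∨ c.toNat.log2 < e' holds iff 'c < 2 ^ e' (Nat.log2_lt), so this phrasing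
-- excludes no input A returns on.
def Pre_code_to_tuple_py (c : Int) (word_length : Int) (nb_of_words : Int) : Prop :=
  0 ≤ c ∧ (0 ≤ word_length ∨ nb_of_words ≤ 0) ∧
    (c = 0 ∨ c.toNat.log2 < (nb_of_words * word_length).toNat)

instance (c : Int) (word_length : Int) (nb_of_words : Int) : Decidable (Pre_code_to_tuple_py c word_length nb_of_words) := by
  unfold Pre_code_to_tuple_py; infer_instance

def pvWitness_code_to_tuple_py : Int × Int × Int := (300, 8, 3)

def Spec_code_to_tuple_py (c : Int) (word_length : Int) (nb_of_words : Int) (out : List Int) : Prop := out = code_to_tuple_py_alt c word_length nb_of_words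
instance (c : Int) (word_length : Int) (nb_of_words : Int) (out : List Int) : Decidable (Spec_code_to_tuple_py c word_length nb_of_words out) := by unfold Spec_code_to_tuple_py; infer_instance

-- ===== CLAIM (what is proved, stated in full; the proofs are below) =====
def Claim_equal_code_to_tuple_py : Prop := ∀ (c : Int) (word_length : Int) (nb_of_words : Int), Dom_code_to_tuple_py c word_length nb_of_words → Pre_code_to_tuple_py c word_length nb_of_words → Spec_code_to_tuple_py c word_length nb_of_words (code_to_tuple_py c word_length nb_of_words)

-- ===== LEMMAS AND PROOFS =====

lemma nat_mask_shift (m x s : Nat) : ((x <<< s) &&& m) >>> s = (m >>> s) &&& x := by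
  apply Nat.eq_of_testBit_eq
  intro j
  simp [Nat.testBit_shiftRight, Nat.testBit_and, Nat.testBit_shiftLeft, Bool.and_comm]

-- the common value: word i (counted from the least-significant end) of m in base 2^w
def pvWord (m w i : Nat) : Int := ((m / 2 ^ (i * w)) % 2 ^ w : Nat)

lemma a_elem (m w s : Nat) :
    (PySem.Int.band (m : Int) (((2 : Int) ^ w - 1) <<< s)) >>> s = ((m >>> s) % 2 ^ w : Nat) := by
  have h1 : ((2 : Int) ^ w - 1) = ((2 ^ w - 1 : Nat) : Int) := by
    push_cast [Nat.one_le_two_pow]; ring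
  rw [h1, show (((2 ^ w - 1 : Nat) : Int) <<< s) = (((2 ^ w - 1) <<< s : Nat) : Int) from
      (Int.natCast_shiftLeft _ _).symm,
    PySem.Int.band_natCast,
    show (((m &&& (2 ^ w - 1) <<< s : Nat) : Int) >>> s) = (((m &&& (2 ^ w - 1) <<< s) >>> s : Nat) : Int) from
      (Int.natCast_shiftRight _ _).symm]
  norm_cast
  rw [Nat.and_comm, nat_mask_shift, Nat.and_two_pow_sub_one_eq_mod]

lemma a_eq (m w n : Nat) :
    code_to_tuple_py (m : Int) (w : Int) (n : Int) = ((List.range n).map (pvWord m w)).reverse := by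
  unfold code_to_tuple_py
  rw [PySem.List.slice?_none_none_neg_one, Option.getD_some, PySem.List.pyRange_one,
    List.map_reverse, List.map_map]
  congr 1
  simp only [Int.sub_zero, Int.toNat_natCast]
  apply List.map_congr_left
  intro k _
  have hs : ((0 : Int) + (k : Int)) * (w : Int) = ((k * w : Nat) : Int) := by push_cast; ring
  simp only [Function.comp_apply, hs, Int.toNat_natCast]
  rw [a_elem]
  simp [pvWord, Nat.shiftRight_eq_div_pow]

lemma go_eq (m w : Nat) (n : Nat) (acc : List Int) :
    codeToTupleAltGo ((2 : Int) ^ w) (m : Int) n acc = (acc ++ (List.range n).map (pvWord m w)).reverse := by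
  induction n generalizing m acc with
  | zero => simp [codeToTupleAltGo]
  | succ n ih =>
    have hb : ((2 : Int) ^ w) = ((2 ^ w : Nat) : Int) := by push_cast; ring
    rw [codeToTupleAltGo, hb, PySem.Int.floordiv_natCast, PySem.Int.mod_natCast, ← hb, ih]
    congr 1
    rw [List.append_assoc]
    congr 1
    rw [List.range_succ_eq_map, List.map_cons, List.map_map, List.singleton_append]
    congr 1
    · simp [pvWord]
    · apply List.map_congr_left
      intro i _
      simp only [Function.comp_apply, pvWord]
      rw [Nat.div_div_eq_div_mul]
      congr 3
      rw [← pow_add]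
      congr 1
      rw [Nat.succ_mul]
      omega

-- ===== VERDICT (by name: the statement is the Claim_ definition above) =====
theorem code_to_tuple_py_spec : Claim_equal_code_to_tuple_py := by
  intro c wl nb _ hpre
  obtain ⟨hc, hwl, -⟩ := hpre
  unfold Spec_code_to_tuple_py
  by_cases hnb : nb ≤ 0
  · have h1 : code_to_tuple_py c wl nb = [] := by
      unfold code_to_tuple_py
      rw [PySem.List.pyRange_one_eq_nil hnb, PySem.List.slice?_none_none_neg_one]
      simp
    have h2 : nb.toNat = 0 := by omega
    rw [h1]
    unfold code_to_tuple_py_alt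
    rw [h2]
    simp [codeToTupleAltGo]
  · have hw : 0 ≤ wl := by
      cases hwl with
      | inl h => exact h
      | inr h => omega
    obtain ⟨m, rfl⟩ : ∃ m : Nat, c = (m : Int) := ⟨c.toNat, by omega⟩
    obtain ⟨w, rfl⟩ : ∃ w' : Nat, wl = (w' : Int) := ⟨wl.toNat, by omega⟩
    obtain ⟨n, rfl⟩ : ∃ n' : Nat, nb = (n' : Int) := ⟨nb.toNat, by omega⟩
    rw [a_eq]
    unfold code_to_tuple_py_alt
    simp only [Int.toNat_natCast]
    rw [go_eq]
    simp
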